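-- pv_equiv track=rewrite | github.com/UlitiM2/coderun | 101.py | minimal_board_size
-- ===== SOURCE A (Python) =====
-- import math
--
-- def minimal_board_size(n, w, h):
--     min_side = math.isqrt(n * w * h)
--     if min_side * min_side < n * w * h:
--         min_side += 1
--
--     max_side = n * max(w, h)
--
--     left = min_side
--     right = max_side
--     answer = max_side
--
--     while left <= right:
--         mid = (left + right) // 2
--         diplomas_per_row = mid // w
--         if diplomas_per_row == 0:
--             left = mid + 1
--             continue
--         rows = (n + diplomas_per_row - 1) // diplomas_per_row
--         total_height = rows * h
--         if total_height <= mid: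
--             answer = mid
--             right = mid - 1
--         else:
--             left = mid + 1
--
--     return answer
-- ===== SOURCE B (Python) =====
-- def minimal_board_size(n, w, h):
--     # Enumerate row counts by ceil-division blocks: for r rows we need
--     # c = ceil(n/r) columns, giving square side max(c*w, r*h); within a block
--     # of equal c the smallest r is best, so jump straight to the next block.
--     best = n * max(w, h)          # trivial upper bound: n in one row certainly fits
--     r = 1
--     while r <= n:
--         c = (n + r - 1) // r      # columns needed for r rows
--         side = max(c * w, r * h)
--         if side < best:
--             best = side
--         if c == 1:
--             break
--         r = (n + c - 2) // (c - 1)  # smallest r that needs fewer columns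
--     return best
-- ===== Notes on version B (the rewrite author's own statement) =====
-- stated objective: alternative
-- what changed: Replaces the binary search over candidate side lengths (with an isqrt lower bound) by a direct enumeration of row-count classes in ceil-division blocks, keeping a running minimum of max(columns*w, rows*h) below the trivial bound n*max(w,h).
import Mathlib
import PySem

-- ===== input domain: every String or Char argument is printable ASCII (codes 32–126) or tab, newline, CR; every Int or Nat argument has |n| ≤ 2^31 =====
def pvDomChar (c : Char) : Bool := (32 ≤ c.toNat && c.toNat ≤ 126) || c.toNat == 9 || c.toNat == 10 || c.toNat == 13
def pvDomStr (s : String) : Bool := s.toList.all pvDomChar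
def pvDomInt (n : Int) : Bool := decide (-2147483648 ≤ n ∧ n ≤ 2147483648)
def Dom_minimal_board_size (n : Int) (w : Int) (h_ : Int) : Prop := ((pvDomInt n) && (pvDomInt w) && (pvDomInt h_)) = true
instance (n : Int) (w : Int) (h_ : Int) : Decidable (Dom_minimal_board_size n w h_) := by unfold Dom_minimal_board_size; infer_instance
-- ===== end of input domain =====

-- B replaces A's binary search over side lengths by a direct enumeration of row-count
-- classes (ceil-division blocks) keeping a running minimum; equal wherever A returns.

-- ===== PORT A =====
-- A's while-loop: state (left, right, answer), branches in source order.
def loopA (n : Int) (w : Int) (h_ : Int) (left : Int) (right : Int) (answer : Int) : Int :=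
  if hlr : left ≤ right then
    let mid := PySem.Int.floordiv (left + right) 2
    if PySem.Int.floordiv mid w = 0 then
      loopA n w h_ (mid + 1) right answer
    else
      if PySem.Int.floordiv (n + PySem.Int.floordiv mid w - 1) (PySem.Int.floordiv mid w) * h_ ≤ mid then
        loopA n w h_ left (mid - 1) mid
      else
        loopA n w h_ (mid + 1) right answer
  else answer
termination_by (right + 1 - left).toNat
decreasing_by
  all_goals
    have hb := PySem.Int.floordiv_two_mid_bounds hlr
    omega

def minimal_board_size (n : Int) (w : Int) (h_ : Int) : Int :=
  -- math.isqrt ported via Nat.sqrt: exact for n*w*h ≥ 0 (math.isqrt raises on negatives, outside Pre_)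
  let t : Int := ((n * w * h_).toNat.sqrt : Int)
  let min_side := if t * t < n * w * h_ then t + 1 else t
  let max_side := n * max w h_
  loopA n w h_ min_side max_side max_side

-- ===== PORT B =====
-- B's while-loop with explicit fuel (n.toNat + 1 steps suffice: r starts at 1 and
-- strictly increases while r ≤ n, proved in loopB_r_lt_jump below).
def loopB (fuel : Nat) (n : Int) (w : Int) (h_ : Int) (r : Int) (best : Int) : Int :=
  match fuel with
  | 0 => best
  | fuel + 1 =>
    if r ≤ n then
      let c := PySem.Int.floordiv (n + r - 1) r
      let side := max (c * w) (r * h_)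
      let best' := if side < best then side else best
      if c = 1 then best'
      else loopB fuel n w h_ (PySem.Int.floordiv (n + c - 2) (c - 1)) best'
    else best

def minimal_board_size_alt (n : Int) (w : Int) (h_ : Int) : Int :=
  loopB (n.toNat + 1) n w h_ 1 (n * max w h_)

-- ===== PRECONDITION & SPEC =====
-- Pre_ excludes exactly the inputs on which A raises: n*w*h < 0 (ValueError from
-- math.isqrt) and w = 0 with a non-empty search range (ZeroDivisionError at mid // w).
def Pre_minimal_board_size (n : Int) (w : Int) (h_ : Int) : Prop :=
  0 ≤ n * w * h_ ∧ (w ≠ 0 ∨ n * max w h_ < 0)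
instance (n : Int) (w : Int) (h_ : Int) : Decidable (Pre_minimal_board_size n w h_) := by
  unfold Pre_minimal_board_size; infer_instance

def pvWitness_minimal_board_size : Int × Int × Int := (5, 2, 3)

def Spec_minimal_board_size (n : Int) (w : Int) (h_ : Int) (out : Int) : Prop :=
  out = minimal_board_size_alt n w h_
instance (n : Int) (w : Int) (h_ : Int) (out : Int) : Decidable (Spec_minimal_board_size n w h_ out) := by
  unfold Spec_minimal_board_size; infer_instance

-- ===== CLAIM (what is proved, stated in full; the proofs are below) =====
def Claim_equal_minimal_board_size : Prop :=
  ∀ (n : Int) (w : Int) (h_ : Int), Dom_minimal_board_size n w h_ →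
    Pre_minimal_board_size n w h_ →
    Spec_minimal_board_size n w h_ (minimal_board_size n w h_)

-- ===== LEMMAS AND PROOFS =====

-- ceiling division as both programs compute it: ceil(n/d) = (n + d - 1) // d
def ceilD (n : Int) (d : Int) : Int := PySem.Int.floordiv (n + d - 1) d

-- a side s is feasible iff at least one diploma fits per row and the required rows fit
def Feas (n : Int) (w : Int) (h_ : Int) (s : Int) : Prop :=
  1 ≤ PySem.Int.floordiv s w ∧
    PySem.Int.floordiv (n + PySem.Int.floordiv s w - 1) (PySem.Int.floordiv s w) * h_ ≤ s

lemma ceilD_le_iff {n d k : Int} (hd : 0 < d) : ceilD n d ≤ k ↔ n ≤ k * d := by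
  unfold ceilD
  constructor
  · intro h
    have h2 : ¬ (k + 1 ≤ PySem.Int.floordiv (n + d - 1) d) := by omega
    rw [PySem.Int.le_floordiv_iff_mul_le hd] at h2
    nlinarith
  · intro h
    have h2 : PySem.Int.floordiv (n + d - 1) d < k + 1 := by
      rw [PySem.Int.floordiv_lt_iff_lt_mul hd]
      nlinarith
    omega

lemma one_le_ceilD {n d : Int} (hd : 0 < d) (hn : 1 ≤ n) : 1 ≤ ceilD n d := by
  by_contra h
  have : ceilD n d ≤ 0 := by omega
  rw [ceilD_le_iff hd] at this
  omega

lemma ceilD_mul_ge {n d : Int} (hd : 0 < d) : n ≤ ceilD n d * d :=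
  (ceilD_le_iff hd).mp le_rfl

lemma Feas_mono {n w h_ s t : Int} (hw : 1 ≤ w) (hh : 0 ≤ h_) (hn : 1 ≤ n)
    (hst : s ≤ t) (hf : Feas n w h_ s) : Feas n w h_ t := by
  obtain ⟨hd, hr⟩ := hf
  have hw0 : (0:Int) < w := by omega
  have hds : PySem.Int.floordiv s w * w ≤ s := (PySem.Int.le_floordiv_iff_mul_le hw0).mp le_rfl
  have hdt : PySem.Int.floordiv s w ≤ PySem.Int.floordiv t w := by
    rw [PySem.Int.le_floordiv_iff_mul_le hw0]; omega
  have hd1 : 1 ≤ PySem.Int.floordiv t w := le_trans hd hdt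
  refine ⟨hd1, ?_⟩
  set ds := PySem.Int.floordiv s w with hds'
  set dt := PySem.Int.floordiv t w with hdt'
  have hds0 : (0:Int) < ds := by omega
  have hdt0 : (0:Int) < dt := by omega
  have hrows : ceilD n dt ≤ ceilD n ds := by
    rw [ceilD_le_iff hdt0]
    have h1 : n ≤ ceilD n ds * ds := ceilD_mul_ge hds0
    nlinarith [one_le_ceilD hds0 hn]
  have hr1 : (1:Int) ≤ ceilD n ds := one_le_ceilD hds0 hn
  show ceilD n dt * h_ ≤ t
  have : ceilD n dt * h_ ≤ ceilD n ds * h_ := by nlinarith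
  calc ceilD n dt * h_ ≤ ceilD n ds * h_ := this
    _ ≤ s := hr
    _ ≤ t := hst

lemma Feas_sq {n w h_ s : Int} (hn : 1 ≤ n) (hw : 1 ≤ w) (hh : 0 ≤ h_)
    (hf : Feas n w h_ s) : n * w * h_ ≤ s * s ∧ 1 ≤ s := by
  obtain ⟨hd, hr⟩ := hf
  have hw0 : (0:Int) < w := by omega
  set d := PySem.Int.floordiv s w with hd'
  have hds : d * w ≤ s := (PySem.Int.le_floordiv_iff_mul_le hw0).mp le_rfl
  have hs1 : 1 ≤ s := by nlinarith
  have hd0 : (0:Int) < d := by omega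
  have hrows1 : 1 ≤ ceilD n d := one_le_ceilD hd0 hn
  have hnd : n ≤ ceilD n d * d := ceilD_mul_ge hd0
  have hr2 : ceilD n d * h_ ≤ s := hr
  have hch : 0 ≤ ceilD n d * h_ := by nlinarith
  have key : (d * w) * (ceilD n d * h_) ≤ s * s := mul_le_mul hds hr2 hch (by omega)
  have h5 : n * (w * h_) ≤ (ceilD n d * d) * (w * h_) := by
    have hwh : (0:Int) ≤ w * h_ := by nlinarith
    exact mul_le_mul_of_nonneg_right hnd hwh
  have h6 : (ceilD n d * d) * (w * h_) = (d * w) * (ceilD n d * h_) := by ring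
  constructor
  · nlinarith [key, h5, h6]
  · exact hs1

-- the candidate for r rows is feasible
lemma cand_feas {n w h_ r : Int} (hn : 1 ≤ n) (hw : 1 ≤ w) (hh : 0 ≤ h_)
    (hr1 : 1 ≤ r) (_hrn : r ≤ n) :
    Feas n w h_ (max (ceilD n r * w) (r * h_)) := by
  have hw0 : (0:Int) < w := by omega
  have hr0 : (0:Int) < r := by omega
  set c := ceilD n r with hc'
  have hc1 : 1 ≤ c := one_le_ceilD hr0 hn
  set s := max (c * w) (r * h_) with hs'
  have hcw : c * w ≤ s := le_max_left _ _
  have hrh : r * h_ ≤ s := le_max_right _ _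
  have hd : c ≤ PySem.Int.floordiv s w := by
    rw [PySem.Int.le_floordiv_iff_mul_le hw0]; omega
  have hd1 : 1 ≤ PySem.Int.floordiv s w := le_trans hc1 hd
  refine ⟨hd1, ?_⟩
  set d := PySem.Int.floordiv s w with hd'
  have hd0 : (0:Int) < d := by omega
  have hrows : ceilD n d ≤ r := by
    rw [ceilD_le_iff hd0]
    have : n ≤ c * r := by have := ceilD_mul_ge hr0 (n := n); omega
    nlinarith
  show ceilD n d * h_ ≤ s
  have hrows1 : 1 ≤ ceilD n d := one_le_ceilD hd0 hn
  nlinarith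

-- every feasible side dominates some row-count candidate with 1 ≤ r ≤ n
lemma cand_le {n w h_ s : Int} (hn : 1 ≤ n) (hw : 1 ≤ w) (_hh : 0 ≤ h_)
    (hf : Feas n w h_ s) :
    ∃ r, 1 ≤ r ∧ r ≤ n ∧ max (ceilD n r * w) (r * h_) ≤ s := by
  obtain ⟨hd, hr⟩ := hf
  have hw0 : (0:Int) < w := by omega
  set d := PySem.Int.floordiv s w with hd'
  have hd0 : (0:Int) < d := by omega
  refine ⟨ceilD n d, one_le_ceilD hd0 hn, ?_, ?_⟩
  · rw [ceilD_le_iff hd0]; nlinarith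
  · have hds : d * w ≤ s := (PySem.Int.le_floordiv_iff_mul_le hw0).mp le_rfl
    have hc : ceilD n (ceilD n d) ≤ d := by
      have hr0 : (0:Int) < ceilD n d := one_le_ceilD hd0 hn
      rw [ceilD_le_iff hr0]
      have := ceilD_mul_ge hd0 (n := n)
      nlinarith
    apply max_le
    · nlinarith
    · exact hr

-- A's binary search returns a least feasible side, given the loop invariants
lemma loopA_spec (n w h_ : Int) (hn : 1 ≤ n) (hw : 1 ≤ w) (hh : 0 ≤ h_)
    (left right answer : Int) (hl : 0 ≤ left)
    (h1 : ∀ s, s < left → ¬ Feas n w h_ s)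
    (h2 : Feas n w h_ answer)
    (h3 : ∀ s, right < s → Feas n w h_ s → answer ≤ s) :
    Feas n w h_ (loopA n w h_ left right answer) ∧
      ∀ s, Feas n w h_ s → loopA n w h_ left right answer ≤ s := by
  rw [loopA]
  split
  case isTrue hlr =>
    dsimp only
    have hb := PySem.Int.floordiv_two_mid_bounds hlr
    set mid := PySem.Int.floordiv (left + right) 2 with hmid
    have hw0 : (0:Int) < w := by omega
    have hmid0 : (0:Int) ≤ PySem.Int.floordiv mid w := by
      rw [PySem.Int.le_floordiv_iff_mul_le hw0]; omega
    split
    case isTrue hd0 =>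
      -- no diploma fits in a row of width mid: mid infeasible
      have hnf : ¬ Feas n w h_ mid := by
        intro hf; have := hf.1; omega
      refine loopA_spec n w h_ hn hw hh (mid + 1) right answer (by omega) ?_ h2 h3
      intro s hs hf
      by_cases h : s < left
      · exact h1 s h hf
      · exact hnf (Feas_mono hw hh hn (by omega) hf)
    case isFalse hd0 =>
      have hd1 : 1 ≤ PySem.Int.floordiv mid w := by omega
      split
      case isTrue hfit =>
        have hf : Feas n w h_ mid := ⟨hd1, hfit⟩
        refine loopA_spec n w h_ hn hw hh left (mid - 1) mid hl h1 hf ?_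
        intro s hs _; omega
      case isFalse hfit =>
        have hnf : ¬ Feas n w h_ mid := fun hf => hfit hf.2
        refine loopA_spec n w h_ hn hw hh (mid + 1) right answer (by omega) ?_ h2 h3
        intro s hs hf
        by_cases h : s < left
        · exact h1 s h hf
        · exact hnf (Feas_mono hw hh hn (by omega) hf)
  case isFalse hlr =>
    refine ⟨h2, fun s hf => ?_⟩
    by_cases h : s < left
    · exact absurd hf (h1 s h)
    · exact h3 s (by omega) hf
termination_by (right + 1 - left).toNat
decreasing_by all_goals omega

-- the jump target strictly exceeds r (so n + 1 fuel steps suffice)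
lemma loopB_r_lt_jump {n r : Int} (hn : 1 ≤ n) (hr : 1 ≤ r) (_hrn : r ≤ n)
    (hc : ceilD n r ≠ 1) : r < ceilD n (ceilD n r - 1) := by
  have hr0 : (0:Int) < r := by omega
  set c := ceilD n r with hc'
  have hc1 : 1 ≤ c := one_le_ceilD hr0 hn
  have hc2 : 2 ≤ c := by omega
  have hgt : ¬ (n ≤ (c - 1) * r) := by
    intro h
    have : c ≤ c - 1 := by rw [hc', ceilD_le_iff hr0]; linarith
    omega
  by_contra h
  have h2 : ceilD n (c - 1) ≤ r := by omega
  rw [ceilD_le_iff (by omega : (0:Int) < c - 1)] at h2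
  apply hgt; nlinarith

-- B's loop keeps a feasible best
lemma loopB_feas (fuel : Nat) (n w h_ : Int) (hn : 1 ≤ n) (hw : 1 ≤ w) (hh : 0 ≤ h_) :
    ∀ r best, 1 ≤ r → Feas n w h_ best → Feas n w h_ (loopB fuel n w h_ r best) := by
  induction fuel with
  | zero => intro r best _ hb; exact hb
  | succ fuel ih =>
    intro r best hr hb
    rw [loopB]
    dsimp only
    split
    case isTrue hrn =>
      have hr0 : (0:Int) < r := by omega
      have hcand : Feas n w h_ (max (PySem.Int.floordiv (n + r - 1) r * w) (r * h_)) :=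
        cand_feas hn hw hh hr hrn
      have hbest' : Feas n w h_
          (if max (PySem.Int.floordiv (n + r - 1) r * w) (r * h_) < best then
            max (PySem.Int.floordiv (n + r - 1) r * w) (r * h_) else best) := by
        split <;> assumption
      split
      case isTrue => exact hbest'
      case isFalse hc1 =>
        apply ih _ _ _ hbest'
        have hc : 1 ≤ PySem.Int.floordiv (n + r - 1) r := one_le_ceilD hr0 hn
        have hc2 : 2 ≤ PySem.Int.floordiv (n + r - 1) r := by omega
        have h1c : 1 ≤ ceilD n (PySem.Int.floordiv (n + r - 1) r - 1) :=
          one_le_ceilD (by omega) hn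
        have heq : n + PySem.Int.floordiv (n + r - 1) r - 2
            = n + (PySem.Int.floordiv (n + r - 1) r - 1) - 1 := by ring
        show 1 ≤ PySem.Int.floordiv (n + PySem.Int.floordiv (n + r - 1) r - 2)
          (PySem.Int.floordiv (n + r - 1) r - 1)
        rw [heq]
        exact h1c
    case isFalse => exact hb

-- B's loop result is below best and below every candidate with r ≤ m ≤ n
lemma loopB_ub (fuel : Nat) (n w h_ : Int) (hn : 1 ≤ n) (_hw : 1 ≤ w) (hh : 0 ≤ h_) :
    ∀ r best, 1 ≤ r → n < r + fuel →
      loopB fuel n w h_ r best ≤ best ∧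
      ∀ m, r ≤ m → m ≤ n →
        loopB fuel n w h_ r best ≤ max (ceilD n m * w) (m * h_) := by
  induction fuel with
  | zero =>
    intro r best hr hfuel
    exact ⟨le_rfl, fun m hm1 hm2 => by omega⟩
  | succ fuel ih =>
    intro r best hr hfuel
    rw [loopB]
    dsimp only
    split
    case isTrue hrn =>
      have hr0 : (0:Int) < r := by omega
      set c := PySem.Int.floordiv (n + r - 1) r with hc'
      have hceq : c = ceilD n r := rfl
      have hc1 : 1 ≤ c := by rw [hceq]; exact one_le_ceilD hr0 hn
      set side := max (c * w) (r * h_) with hside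
      set best' := if side < best then side else best with hbest'
      have hb1 : best' ≤ best := by rw [hbest']; split <;> omega
      have hb2 : best' ≤ side := by rw [hbest']; split <;> omega
      split
      case isTrue hcone =>
        refine ⟨hb1, fun m hm1 hm2 => ?_⟩
        -- c = 1 forces n ≤ r, hence m = r
        have hnr : n ≤ r := by
          have : ceilD n r ≤ 1 := by rw [← hceq, hcone]
          rw [ceilD_le_iff hr0] at this; omega
        have hmr : m = r := by omega
        subst hmr
        rw [← hceq]
        exact hb2
      case isFalse hcone =>
        have hjump : r < ceilD n (c - 1) := by
          rw [hceq] at hcone ⊢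
          exact loopB_r_lt_jump hn hr hrn hcone
        have hjord : ceilD n (c - 1) = PySem.Int.floordiv (n + c - 2) (c - 1) := by
          unfold ceilD; ring_nf
        obtain ⟨ih1, ih2⟩ := ih (PySem.Int.floordiv (n + c - 2) (c - 1)) best'
          (by omega) (by omega)
        refine ⟨le_trans ih1 hb1, fun m hm1 hm2 => ?_⟩
        by_cases h : PySem.Int.floordiv (n + c - 2) (c - 1) ≤ m
        · exact ih2 m h hm2
        · -- m is still in the current class: ceilD n m = c
          have h : m < PySem.Int.floordiv (n + c - 2) (c - 1) := by omega
          have hm0 : (0:Int) < m := by omega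
          have hcm_le : ceilD n m ≤ c := by
            rw [ceilD_le_iff hm0]
            have : n ≤ c * r := by
              have := ceilD_mul_ge hr0 (n := n); rw [← hceq] at this; omega
            nlinarith
          have hcm_ge : c ≤ ceilD n m := by
            by_contra hlt
            have h2 : ceilD n m ≤ c - 1 := by omega
            rw [ceilD_le_iff hm0] at h2
            have h3 : ceilD n (c - 1) ≤ m := by
              rw [ceilD_le_iff (by omega : (0:Int) < c - 1)]; nlinarith
            omega
          have hcm : ceilD n m = c := le_antisymm hcm_le hcm_ge
          rw [hcm]
          have : side ≤ max (c * w) (m * h_) := by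
            apply max_le (le_max_left _ _)
            have : r * h_ ≤ m * h_ := by nlinarith
            exact le_trans this (le_max_right _ _)
          exact le_trans (le_trans ih1 hb2) this
    case isFalse hrn =>
      exact ⟨le_rfl, fun m hm1 hm2 => by omega⟩

-- the adjusted isqrt is a lower bound for every root-dominating s
lemma minside_le (m s : Int) (_hm : 0 ≤ m) (hs : 0 ≤ s) (hss : m ≤ s * s) :
    (if ((m.toNat.sqrt : Int)) * (m.toNat.sqrt : Int) < m then (m.toNat.sqrt : Int) + 1
     else (m.toNat.sqrt : Int)) ≤ s := by
  set k := s.toNat with hk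
  have hks : (k : Int) = s := Int.toNat_of_nonneg hs
  have hmk : m.toNat ≤ k * k := by
    have h1 : ((k * k : Nat) : Int) = s * s := by push_cast [hks]; ring
    omega
  have htk : m.toNat.sqrt ≤ k := by
    have := Nat.sqrt_le_sqrt hmk
    rwa [show k * k = k ^ 2 by ring, Nat.sqrt_eq'] at this
  split
  case isTrue hlt =>
    have hne : m.toNat.sqrt ≠ k := by
      intro heq
      rw [heq] at hlt
      have : ((k * k : Nat) : Int) = s * s := by push_cast [hks]; ring
      nlinarith
    have : m.toNat.sqrt + 1 ≤ k := by omega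
    omega
  case isFalse => omega

-- the initial bound n * max(w,h) is itself a feasible side
lemma maxside_feas {n w h_ : Int} (hn : 1 ≤ n) (hw : 1 ≤ w) (hh : 0 ≤ h_) :
    Feas n w h_ (n * max w h_) := by
  have hw0 : (0:Int) < w := by omega
  have hnd : n ≤ PySem.Int.floordiv (n * max w h_) w := by
    rw [PySem.Int.le_floordiv_iff_mul_le hw0]
    have : w ≤ max w h_ := le_max_left _ _
    nlinarith
  have hd1 : 1 ≤ PySem.Int.floordiv (n * max w h_) w := by omega
  refine ⟨hd1, ?_⟩
  set d := PySem.Int.floordiv (n * max w h_) w with hd'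
  have hd0 : (0:Int) < d := by omega
  have hrows_le : ceilD n d ≤ 1 := by rw [ceilD_le_iff hd0]; omega
  have hrows_ge : 1 ≤ ceilD n d := one_le_ceilD hd0 hn
  have hrows : ceilD n d = 1 := le_antisymm hrows_le hrows_ge
  show ceilD n d * h_ ≤ n * max w h_
  rw [hrows]
  have h1 : h_ ≤ max w h_ := le_max_right _ _
  have h2 : (0:Int) ≤ max w h_ := le_trans (by omega) (le_max_left w h_)
  nlinarith

-- characterization of A's result: feasible, and least among feasible sides
lemma A_least (n w h_ : Int) (hn : 1 ≤ n) (hw : 1 ≤ w) (hh : 0 ≤ h_) :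
    Feas n w h_ (minimal_board_size n w h_) ∧
      ∀ s, Feas n w h_ s → minimal_board_size n w h_ ≤ s := by
  unfold minimal_board_size
  dsimp only
  have hnw : 1 ≤ n * w := by nlinarith
  have hm : 0 ≤ n * w * h_ := by nlinarith
  have hmax : Feas n w h_ (n * max w h_) := maxside_feas hn hw hh
  apply loopA_spec n w h_ hn hw hh _ _ _ ?_ ?_ hmax ?_
  · -- 0 ≤ min_side
    split <;> omega
  · -- everything below min_side is infeasible
    intro s hs hf
    obtain ⟨hsq, hs1⟩ := Feas_sq hn hw hh hf
    have := minside_le (n * w * h_) s hm (by omega) hsq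
    linarith
  · intro s hs _
    exact le_of_lt hs

-- characterization of B's result: feasible, and below every feasible side
lemma B_least (n w h_ : Int) (hn : 1 ≤ n) (hw : 1 ≤ w) (hh : 0 ≤ h_) :
    Feas n w h_ (minimal_board_size_alt n w h_) ∧
      ∀ s, Feas n w h_ s → minimal_board_size_alt n w h_ ≤ s := by
  unfold minimal_board_size_alt
  have hb0 : Feas n w h_ (n * max w h_) := maxside_feas hn hw hh
  constructor
  · exact loopB_feas _ n w h_ hn hw hh 1 _ le_rfl hb0
  · intro s hf
    obtain ⟨r, hr1, hrn, hcand⟩ := cand_le hn hw hh hf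
    have hub := (loopB_ub (n.toNat + 1) n w h_ hn hw hh 1 (n * max w h_)
      le_rfl (by omega)).2 r hr1 hrn
    omega

-- an empty search range returns answer at once
lemma loopA_empty {n w h_ left right answer : Int} (h : right < left) :
    loopA n w h_ left right answer = answer := by
  rw [loopA, dif_neg (by omega : ¬ left ≤ right)]

-- the range [0,0] with w ≠ 0 returns answer: mid = 0 gives diplomas_per_row = 0
lemma loopA_00 {n w h_ answer : Int} : loopA n w h_ 0 0 answer = answer := by
  rw [loopA, dif_pos (le_refl (0:Int))]
  have h2 : PySem.Int.floordiv ((0:Int) + 0) 2 = 0 := by decide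
  rw [h2]
  have h0 : PySem.Int.floordiv (0:Int) w = 0 := by
    simp [PySem.Int.floordiv]
  rw [if_pos h0]
  exact loopA_empty (by omega)

-- with w ≤ -1 and h ≤ 0 no candidate improves on a best that is ≤ n * max(w,h)
lemma loopB_keep {n w h_ : Int} (hn : 1 ≤ n) (hw : w ≤ -1) (hh : h_ ≤ 0) :
    ∀ (fuel : Nat) (r best : Int), 1 ≤ r → best ≤ n * max w h_ →
      loopB fuel n w h_ r best = best := by
  intro fuel
  induction fuel with
  | zero => intro r best _ _; rfl
  | succ fuel ih =>
    intro r best hr hb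
    rw [loopB]
    dsimp only
    split
    case isTrue hrn =>
      have hr0 : (0:Int) < r := by omega
      have hc1 : 1 ≤ PySem.Int.floordiv (n + r - 1) r := one_le_ceilD hr0 hn
      have hcn : ceilD n r ≤ n := by
        rw [ceilD_le_iff hr0]; nlinarith
      have hcn' : PySem.Int.floordiv (n + r - 1) r ≤ n := hcn
      -- the candidate side is at least n * max(w,h)
      have hcw : n * w ≤ PySem.Int.floordiv (n + r - 1) r * w :=
        mul_le_mul_of_nonpos_right hcn' (by omega)
      have hrh : n * h_ ≤ r * h_ := mul_le_mul_of_nonpos_right hrn hh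
      have hside : best ≤ max (PySem.Int.floordiv (n + r - 1) r * w) (r * h_) := by
        rcases le_total w h_ with h | h
        · have : max w h_ = h_ := max_eq_right h
          rw [this] at hb
          exact le_trans hb (le_trans hrh (le_max_right _ _))
        · have : max w h_ = w := max_eq_left h
          rw [this] at hb
          exact le_trans hb (le_trans hcw (le_max_left _ _))
      rw [if_neg (by omega : ¬ max (PySem.Int.floordiv (n + r - 1) r * w) (r * h_) < best)]
      split
      case isTrue => rfl
      case isFalse hc =>
        have hc2 : 2 ≤ PySem.Int.floordiv (n + r - 1) r := by omega
        have h1c : 1 ≤ ceilD n (PySem.Int.floordiv (n + r - 1) r - 1) :=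
          one_le_ceilD (by omega) hn
        have heq : n + PySem.Int.floordiv (n + r - 1) r - 2
            = n + (PySem.Int.floordiv (n + r - 1) r - 1) - 1 := by ring
        apply ih
        · show 1 ≤ PySem.Int.floordiv (n + PySem.Int.floordiv (n + r - 1) r - 2)
            (PySem.Int.floordiv (n + r - 1) r - 1)
          rw [heq]; exact h1c
        · exact hb
    case isFalse => rfl

-- B on n ≤ 0: the loop never runs
lemma alt_nonpos {n w h_ : Int} (hn : n ≤ 0) :
    minimal_board_size_alt n w h_ = n * max w h_ := by
  unfold minimal_board_size_alt
  have h0 : n.toNat = 0 := by omega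
  rw [h0, loopB]
  dsimp only
  rw [if_neg (by omega : ¬ (1:Int) ≤ n)]

-- the adjusted isqrt is nonnegative
lemma minside_nonneg (m : Int) :
    0 ≤ (if ((m.toNat.sqrt : Int)) * (m.toNat.sqrt : Int) < m then (m.toNat.sqrt : Int) + 1
     else (m.toNat.sqrt : Int)) := by
  split <;> omega

-- ===== VERDICT (by name: the statement is the Claim_ definition above) =====
theorem minimal_board_size_spec : Claim_equal_minimal_board_size := by
  intro n w h_ _ hpre
  obtain ⟨hprod, hwz⟩ := hpre
  unfold Spec_minimal_board_size
  by_cases hn : 1 ≤ n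
  · by_cases hw : 1 ≤ w
    · -- the task's proper domain: both sides compute the least feasible square side
      have hh : 0 ≤ h_ := by
        by_contra hc
        have hnw : 1 ≤ n * w := by nlinarith
        nlinarith
      obtain ⟨hAf, hAle⟩ := A_least n w h_ hn hw hh
      obtain ⟨hBf, hBle⟩ := B_least n w h_ hn hw hh
      exact le_antisymm (hAle _ hBf) (hBle _ hAf)
    · -- n ≥ 1, w ≤ -1 (w = 0 is outside Pre_ here): h_ ≤ 0 and both return n * max w h_
      have hwneg : w ≤ -1 := by
        rcases hwz with h | h
        · omega
        · by_contra hc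
          have hw0 : w = 0 := by omega
          rw [hw0] at h
          have : (0:Int) ≤ max 0 h_ := le_max_left _ _
          nlinarith
      have hh : h_ ≤ 0 := by
        by_contra hc
        have hnw : n * w ≤ -1 := by nlinarith
        nlinarith
      have hB : minimal_board_size_alt n w h_ = n * max w h_ := by
        unfold minimal_board_size_alt
        exact loopB_keep hn hwneg hh _ 1 _ le_rfl le_rfl
      rcases eq_or_lt_of_le hh with hz | hneg
      · -- h_ = 0: both sides are 0
        subst hz
        have hmw : max w (0:Int) = 0 := max_eq_right (by omega)
        rw [hB, hmw, mul_zero]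
        unfold minimal_board_size
        dsimp only
        have hm0 : n * w * 0 = 0 := by ring
        rw [hm0, hmw, mul_zero]
        have hms : (if (((0:Int).toNat.sqrt : Int)) * (((0:Int).toNat.sqrt : Int)) < (0:Int)
            then (((0:Int).toNat.sqrt : Int)) + 1 else (((0:Int).toNat.sqrt : Int))) = 0 := by decide
        rw [hms]
        exact loopA_00
      · -- h_ < 0: max_side < 0 ≤ min_side, search range empty
        have hmax : n * max w h_ < 0 := by
          have h1 : max w h_ ≤ -1 := by
            rcases le_total w h_ with h | h
            · rw [max_eq_right h]; omega
            · rw [max_eq_left h]; omega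
          nlinarith
        rw [hB]
        unfold minimal_board_size
        dsimp only
        rw [loopA_empty (lt_of_lt_of_le hmax (minside_nonneg (n * w * h_)))]
  · -- n ≤ 0: B's loop never runs; A returns its max_side bound
    have hn0 : n ≤ 0 := by omega
    rw [alt_nonpos hn0]
    by_cases hmax : n * max w h_ < 0
    · unfold minimal_board_size
      dsimp only
      rw [loopA_empty (lt_of_lt_of_le hmax (minside_nonneg (n * w * h_)))]
    · -- 0 ≤ n * max(w,h) with n ≤ 0: forces n * max w h_ = 0 and a [0,0] range
      have hwne : w ≠ 0 := by
        rcases hwz with h | h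
        · exact h
        · omega
      have hmw0 : n * max w h_ = 0 := by
        rcases eq_or_lt_of_le hn0 with h0 | hlt
        · rw [h0]; ring
        · -- n < 0: max w h_ must be 0 (else n*max < 0 or the product is negative)
          have h1 : max w h_ ≤ 0 := by
            by_contra hc
            have : n * max w h_ < 0 := by nlinarith
            omega
          have hwneg : w ≤ -1 := by
            have := le_max_left w h_
            omega
          have hh0 : 0 ≤ h_ := by
            by_contra hc
            have hnw : 0 < n * w := by
              have := mul_pos (show (0:Int) < -n by omega) (show (0:Int) < -w by omega)
              nlinarith
            have := mul_pos hnw (show (0:Int) < -h_ by omega)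
            nlinarith
          have h2 : h_ ≤ 0 := le_trans (le_max_right w h_) h1
          have h3 : h_ = 0 := le_antisymm h2 hh0
          rw [h3, max_eq_right (by omega : w ≤ (0:Int)), mul_zero]
      rw [hmw0]
      have hm0 : n * w * h_ = 0 := by
        rcases eq_or_lt_of_le hn0 with h0 | hlt
        · rw [h0]; ring
        · have h1 : max w h_ ≤ 0 := by
            by_contra hc
            have : n * max w h_ < 0 := by nlinarith
            omega
          have hwneg : w ≤ -1 := by
            have := le_max_left w h_
            omega
          have hh0 : 0 ≤ h_ := by
            by_contra hc
            have hnw : 0 < n * w := by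
              have := mul_pos (show (0:Int) < -n by omega) (show (0:Int) < -w by omega)
              nlinarith
            have := mul_pos hnw (show (0:Int) < -h_ by omega)
            nlinarith
          have h2 : h_ = 0 := le_antisymm (le_trans (le_max_right w h_) h1) hh0
          rw [h2]; ring
      unfold minimal_board_size
      dsimp only
      rw [hm0, hmw0]
      have hms : (if (((0:Int).toNat.sqrt : Int)) * (((0:Int).toNat.sqrt : Int)) < (0:Int)
          then (((0:Int).toNat.sqrt : Int)) + 1 else (((0:Int).toNat.sqrt : Int))) = 0 := by decide
      rw [hms]
      exact loopA_00
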